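-- pv_equiv track=rewrite | github.com/wenlongli10/VADTree | HGTree_generation.py | remove_redundant
-- ===== SOURCE A (Python) =====
-- def remove_redundant(nodes):
--     non_redundant = []
--     redundant = []
--     for i, node in enumerate(nodes):
--         is_redundant = False
--         for j, other_node in enumerate(nodes):
--             if i != j:
--                 # 检查当前节点是否被其他节点完全包含
--                 if other_node[0][0] >= node[0][0] and other_node[0][1] <= node[0][1]: #其他节点在这个节点内部
--                     if other_node[0][0] == node[0][0] and other_node[0][1] == node[0][1]:
--                         raise ValueError
--                     is_redundant = True
--                     break
--         if not is_redundant: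
--             non_redundant.append(node[0])
--         else:
--             redundant.append(node[0])
--
--     return non_redundant, redundant
-- ===== SOURCE B (Python) =====
-- def remove_redundant(nodes):
--     pairs = [(node[0][0], node[0][1]) for node in nodes]
--     order = sorted(range(len(pairs)), key=lambda i: (pairs[i][0], -pairs[i][1]))
--     flags = [False] * len(pairs)
--     min_end = None
--     for i in reversed(order):
--         b = pairs[i][1]
--         if min_end is not None and min_end <= b:
--             flags[i] = True
--         if min_end is None or b < min_end:
--             min_end = b
--     non_redundant = [nodes[i][0] for i in range(len(nodes)) if not flags[i]]
--     redundant = [nodes[i][0] for i in range(len(nodes)) if flags[i]]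
--     return non_redundant, redundant
-- ===== Notes on version B (the rewrite author's own statement) =====
-- stated objective: alternative
-- what changed: Replaced the all-pairs containment scan by sorting the indices by (start asc, end desc) and one reverse sweep tracking the minimum end to mark dominated intervals, then rebuilding both lists in original order; O(n^2) worst case becomes O(n log n), though A's early break makes it comparable on random data.
-- outside the precondition, e.g. on remove_redundant([[[1]]]): A returns ([[1]], []), B raises IndexError
import Mathlib
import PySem

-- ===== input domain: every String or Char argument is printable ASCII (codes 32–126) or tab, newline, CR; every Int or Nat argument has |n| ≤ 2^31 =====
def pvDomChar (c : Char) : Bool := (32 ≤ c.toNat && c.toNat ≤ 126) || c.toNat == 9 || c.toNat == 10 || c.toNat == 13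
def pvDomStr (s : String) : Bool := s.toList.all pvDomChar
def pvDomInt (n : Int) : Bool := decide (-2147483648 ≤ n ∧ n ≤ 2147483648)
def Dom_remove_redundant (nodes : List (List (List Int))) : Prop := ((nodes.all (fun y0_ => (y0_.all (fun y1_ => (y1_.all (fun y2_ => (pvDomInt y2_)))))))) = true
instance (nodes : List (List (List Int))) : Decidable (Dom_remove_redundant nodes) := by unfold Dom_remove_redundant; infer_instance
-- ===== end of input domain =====

-- B replaces A's all-pairs containment scan by sorting indices by (start asc, end desc) plus one
-- reverse minimum-end sweep; equivalence proved on inputs where A returns normally.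


-- ===== PORT A =====
-- inner 'for j, other_node in enumerate(nodes)' loop; 'none' = the 'raise ValueError' path
-- (excluded by Pre_); 'some fl' = the loop ended with is_redundant = fl.
def pvAInner (a b : Int) (i : Int) : List (Int × List (List Int)) → Option Bool
  | [] => some false
  | (j, other) :: rest =>
    if i ≠ j then
      if (PySem.List.pyGetD (PySem.List.pyGetD other 0 []) 0 0) ≥ a ∧
         (PySem.List.pyGetD (PySem.List.pyGetD other 0 []) 1 0) ≤ b then
        if (PySem.List.pyGetD (PySem.List.pyGetD other 0 []) 0 0) = a ∧
           (PySem.List.pyGetD (PySem.List.pyGetD other 0 []) 1 0) = b then none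
        else some true
      else pvAInner a b i rest
    else pvAInner a b i rest

-- outer 'for i, node in enumerate(nodes)' loop; node[0][k] ported as pyGetD (exact under Pre_,
-- which guarantees the indices exist); on the ValueError path (outside Pre_) the element is skipped.
def remove_redundant (nodes : List (List (List Int))) : List (List Int) × List (List Int) :=
  (PySem.List.enumerate nodes).foldl
    (fun acc p =>
      let node0 := PySem.List.pyGetD p.2 0 []
      match pvAInner (PySem.List.pyGetD node0 0 0) (PySem.List.pyGetD node0 1 0) p.1
              (PySem.List.enumerate nodes) with
      | none => acc
      | some true => (acc.1, acc.2 ++ [node0])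
      | some false => (acc.1 ++ [node0], acc.2))
    ([], [])

-- ===== PORT B =====
-- the reverse sweep over the sorted index order, tracking min_end : Option Int
def pvBSweep (pairs : List (Int × Int)) : List Int → List Bool → Option Int → List Bool
  | [], flags, _ => flags
  | i :: rest, flags, minEnd =>
    let b := (PySem.List.pyGetD pairs i (0, 0)).2
    let flags' := match minEnd with
      | some m => if m ≤ b then PySem.List.pySetD flags i true else flags
      | none => flags
    let minEnd' := match minEnd with
      | some m => if b < m then some b else some m
      | none => some b
    pvBSweep pairs rest flags' minEnd'

def remove_redundant_alt (nodes : List (List (List Int))) : List (List Int) × List (List Int) :=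
  let pairs := nodes.map (fun node =>
    (PySem.List.pyGetD (PySem.List.pyGetD node 0 []) 0 0,
     PySem.List.pyGetD (PySem.List.pyGetD node 0 []) 1 0))
  let order := PySem.List.sorted2 (PySem.List.pyRange 0 (PySem.List.len pairs) 1)
      (fun i => (PySem.List.pyGetD pairs i (0, 0)).1)
      (fun i => -(PySem.List.pyGetD pairs i (0, 0)).2) false
  let flags := pvBSweep pairs order.reverse (List.replicate pairs.length false) none
  (((PySem.List.pyRange 0 (PySem.List.len pairs) 1).filter
        (fun i => !(PySem.List.pyGetD flags i false))).map
      (fun i => PySem.List.pyGetD (PySem.List.pyGetD nodes i []) 0 []),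
     ((PySem.List.pyRange 0 (PySem.List.len pairs) 1).filter
        (fun i => PySem.List.pyGetD flags i false)).map
      (fun i => PySem.List.pyGetD (PySem.List.pyGetD nodes i []) 0 []))

-- ===== PRECONDITION & SPEC =====
-- Pre_ excludes (a) malformed nodes, on which A's node[0]/node[0][1] may raise IndexError or B's
-- pair-building does, and (b) lists with duplicate (start, end) first-interval pairs, on which A
-- raises ValueError or returns depending on accidental scan order (B never raises on those and
-- happens to return A's value whenever A returns, but that corner is not part of the claim).
def Pre_remove_redundant (nodes : List (List (List Int))) : Prop :=
  (∀ node ∈ nodes, node ≠ [] ∧ 2 ≤ node.headI.length) ∧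
  (nodes.map (fun node => (node.headI.headI, node.headI.tail.headI))).Nodup
instance (nodes : List (List (List Int))) : Decidable (Pre_remove_redundant nodes) := by
  unfold Pre_remove_redundant; infer_instance

def pvWitness_remove_redundant : List (List (List Int)) := [[[0, 5]], [[1, 2], [9]], [[6, 7]]]

def Spec_remove_redundant (nodes : List (List (List Int))) (out : List (List Int) × List (List Int)) : Prop := out = remove_redundant_alt nodes
instance (nodes : List (List (List Int))) (out : List (List Int) × List (List Int)) : Decidable (Spec_remove_redundant nodes out) := by unfold Spec_remove_redundant; infer_instance

-- ===== CLAIM (what is proved, stated in full; the proofs are below) =====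
def Claim_equal_remove_redundant : Prop := ∀ (nodes : List (List (List Int))), Dom_remove_redundant nodes → Pre_remove_redundant nodes → Spec_remove_redundant nodes (remove_redundant nodes)

-- ===== LEMMAS AND PROOFS =====

-- the (start, end) pair list both programs compare by
def pvPairs (nodes : List (List (List Int))) : List (Int × Int) :=
  nodes.map (fun node =>
    (PySem.List.pyGetD (PySem.List.pyGetD node 0 []) 0 0,
     PySem.List.pyGetD (PySem.List.pyGetD node 0 []) 1 0))

-- "index i is redundant": some other in-range index j has a containing-or-equal pair
def pvRed (ps : List (Int × Int)) (i : Int) : Bool :=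
  decide (∃ j ∈ PySem.List.pyRange 0 (ps.length : Int) 1, j ≠ i ∧
    (PySem.List.pyGetD ps j (0, 0)).1 ≥ (PySem.List.pyGetD ps i (0, 0)).1 ∧
    (PySem.List.pyGetD ps j (0, 0)).2 ≤ (PySem.List.pyGetD ps i (0, 0)).2)

-- the common canonical result both ports are reduced to
def pvCanon (nodes : List (List (List Int))) : List (List Int) × List (List Int) :=
  (((PySem.List.pyRange 0 ((pvPairs nodes).length : Int) 1).filter
      (fun i => !(pvRed (pvPairs nodes) i))).map
    (fun i => PySem.List.pyGetD (PySem.List.pyGetD nodes i []) 0 []),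
   ((PySem.List.pyRange 0 ((pvPairs nodes).length : Int) 1).filter
      (fun i => pvRed (pvPairs nodes) i)).map
    (fun i => PySem.List.pyGetD (PySem.List.pyGetD nodes i []) 0 []))


lemma pv_getD0 (l : List Int) : PySem.List.pyGetD l 0 0 = l.headI := by
  cases l <;> simp [PySem.List.pyGetD, PySem.List.pyGet?, PySem.List.pyIdx?]

lemma pv_getD1 (l : List Int) : PySem.List.pyGetD l 1 0 = l.tail.headI := by
  match l with
  | [] => rfl
  | [x] => rfl
  | x :: y :: t => simp [PySem.List.pyGetD, PySem.List.pyGet?, PySem.List.pyIdx?]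

lemma pv_getDL (l : List (List Int)) : PySem.List.pyGetD l 0 [] = l.headI := by
  cases l <;> simp [PySem.List.pyGetD, PySem.List.pyGet?, PySem.List.pyIdx?, List.headI]
  rfl

lemma pvPairs_eq_headI (nodes : List (List (List Int))) :
    pvPairs nodes = nodes.map (fun node => (node.headI.headI, node.headI.tail.headI)) := by
  simp [pvPairs, pv_getD0, pv_getD1, pv_getDL]

lemma pvPairs_getD (nodes : List (List (List Int))) (j : Int) :
    PySem.List.pyGetD (pvPairs nodes) j (0, 0) =
      (PySem.List.pyGetD (PySem.List.pyGetD (PySem.List.pyGetD nodes j []) 0 []) 0 0,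
       PySem.List.pyGetD (PySem.List.pyGetD (PySem.List.pyGetD nodes j []) 0 []) 1 0) := by
  have h := PySem.List.pyGetD_map (fun node =>
    (PySem.List.pyGetD (PySem.List.pyGetD node 0 []) 0 0,
     PySem.List.pyGetD (PySem.List.pyGetD node 0 []) 1 0)) nodes j []
  simpa [pvPairs] using h

lemma pvPairs_getD_ne (nodes : List (List (List Int))) (h : (pvPairs nodes).Nodup)
    (i j : Int) (hi0 : 0 ≤ i) (hi1 : i < (pvPairs nodes).length)
    (hj0 : 0 ≤ j) (hj1 : j < (pvPairs nodes).length) (hne : i ≠ j) :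
    PySem.List.pyGetD (pvPairs nodes) i (0, 0) ≠ PySem.List.pyGetD (pvPairs nodes) j (0, 0) := by
  set ps := pvPairs nodes with hps
  have hi : i.toNat < ps.length := by omega
  have hj : j.toNat < ps.length := by omega
  rw [PySem.List.pyGetD_of_nonneg ps _ hi0, PySem.List.pyGetD_of_nonneg ps _ hj0,
    List.getD_eq_getElem ps _ hi, List.getD_eq_getElem ps _ hj]
  simp only [ne_eq, List.Nodup.getElem_inj_iff h]
  omega

lemma pvAInner_eq_any (a b i : Int) (l : List (Int × List (List Int)))
    (hne : ∀ p ∈ l, p.1 ≠ i →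
      ¬(PySem.List.pyGetD (PySem.List.pyGetD p.2 0 []) 0 0 = a ∧
        PySem.List.pyGetD (PySem.List.pyGetD p.2 0 []) 1 0 = b)) :
    pvAInner a b i l = some (l.any (fun p => decide (p.1 ≠ i ∧
      PySem.List.pyGetD (PySem.List.pyGetD p.2 0 []) 0 0 ≥ a ∧
      PySem.List.pyGetD (PySem.List.pyGetD p.2 0 []) 1 0 ≤ b))) := by
  induction l with
  | nil => simp [pvAInner]
  | cons p rest ih =>
    obtain ⟨j, other⟩ := p
    have hrest : ∀ q ∈ rest, q.1 ≠ i →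
        ¬(PySem.List.pyGetD (PySem.List.pyGetD q.2 0 []) 0 0 = a ∧
          PySem.List.pyGetD (PySem.List.pyGetD q.2 0 []) 1 0 = b) := by
      intro q hq; exact hne q (List.mem_cons_of_mem _ hq)
    by_cases hij : i ≠ j
    · by_cases hc : PySem.List.pyGetD (PySem.List.pyGetD other 0 []) 0 0 ≥ a ∧
          PySem.List.pyGetD (PySem.List.pyGetD other 0 []) 1 0 ≤ b
      · have heq := hne (j, other) (List.mem_cons_self) (by simpa using Ne.symm hij)
        simp only [pvAInner, if_pos hij, if_pos hc, if_neg heq]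
        have : ((j, other).1 ≠ i ∧
            PySem.List.pyGetD (PySem.List.pyGetD (j, other).2 0 []) 0 0 ≥ a ∧
            PySem.List.pyGetD (PySem.List.pyGetD (j, other).2 0 []) 1 0 ≤ b) := ⟨Ne.symm hij, hc⟩
        simp [List.any_cons, this]
      · simp only [pvAInner, if_pos hij, if_neg hc, ih hrest]
        have : ¬((j, other).1 ≠ i ∧
            PySem.List.pyGetD (PySem.List.pyGetD (j, other).2 0 []) 0 0 ≥ a ∧
            PySem.List.pyGetD (PySem.List.pyGetD (j, other).2 0 []) 1 0 ≤ b) := by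
          intro h; exact hc h.2
        simp [List.any_cons, this]
    · simp only [pvAInner, if_neg hij, ih hrest]
      have : ¬((j, other).1 ≠ i ∧
          PySem.List.pyGetD (PySem.List.pyGetD (j, other).2 0 []) 0 0 ≥ a ∧
          PySem.List.pyGetD (PySem.List.pyGetD (j, other).2 0 []) 1 0 ≤ b) := by
        intro h; exact h.1 (not_not.mp hij).symm
      simp [List.any_cons, this]

lemma pv_foldl_partition (f : Int → List Int) (cond : Int → Bool) (L : List Int) :
    L.foldl (fun acc j => if cond j = true then (acc.1, acc.2 ++ [f j]) else (acc.1 ++ [f j], acc.2))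
      (([], []) : List (List Int) × List (List Int))
    = ((L.filter (fun j => !cond j)).map f, (L.filter cond).map f) := by
  have hfun : (fun (acc : List (List Int) × List (List Int)) j =>
        if cond j = true then (acc.1, acc.2 ++ [f j]) else (acc.1 ++ [f j], acc.2))
      = (fun (acc : List (List Int) × List (List Int)) j =>
        ((fun s e => if (!cond e) = true then s ++ [f e] else s) acc.1 j,
         (fun s e => if cond e = true then s ++ [f e] else s) acc.2 j)) := by
    funext acc j; cases hc : cond j <;> simp [hc]
  rw [hfun, PySem.List.foldl_prod_mk (fun s e => if (!cond e) = true then s ++ [f e] else s)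
    (fun s e => if cond e = true then s ++ [f e] else s) L [] [],
    PySem.List.foldl_append_if, PySem.List.foldl_append_if]
  simp

lemma pvA_eq_canon (nodes : List (List (List Int))) (h : Pre_remove_redundant nodes) :
    remove_redundant nodes = pvCanon nodes := by
  have hnodup : (pvPairs nodes).Nodup := by rw [pvPairs_eq_headI]; exact h.2
  have hlen : (pvPairs nodes).length = nodes.length := by simp [pvPairs]
  simp only [remove_redundant, PySem.List.enumerate_eq_map_pyRange nodes [], List.foldl_map,
    PySem.List.len_eq]
  rw [PySem.List.foldl_congr_mem _ _
    (fun (acc : List (List Int) × List (List Int)) j =>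
      if pvRed (pvPairs nodes) j = true
      then (acc.1, acc.2 ++ [PySem.List.pyGetD (PySem.List.pyGetD nodes j []) 0 []])
      else (acc.1 ++ [PySem.List.pyGetD (PySem.List.pyGetD nodes j []) 0 []], acc.2)) _ ?_]
  · rw [pv_foldl_partition]
    simp [pvCanon, hlen]
  · intro acc j hj
    rw [PySem.List.mem_pyRange_one] at hj
    have hne : ∀ p ∈ (PySem.List.pyRange 0 (↑nodes.length) 1).map
        (fun j' => (j', PySem.List.pyGetD nodes j' [])), p.1 ≠ j →
        ¬(PySem.List.pyGetD (PySem.List.pyGetD p.2 0 []) 0 0 =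
            PySem.List.pyGetD (PySem.List.pyGetD (PySem.List.pyGetD nodes j []) 0 []) 0 0 ∧
          PySem.List.pyGetD (PySem.List.pyGetD p.2 0 []) 1 0 =
            PySem.List.pyGetD (PySem.List.pyGetD (PySem.List.pyGetD nodes j []) 0 []) 1 0) := by
      intro p hp hp1
      obtain ⟨j', hj', rfl⟩ := List.mem_map.mp hp
      rw [PySem.List.mem_pyRange_one] at hj'
      intro hcon
      have hne' := pvPairs_getD_ne nodes hnodup j' j hj'.1 (by omega) hj.1 (by omega)
        (by simpa using hp1)
      apply hne'
      rw [pvPairs_getD, pvPairs_getD]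
      exact Prod.ext hcon.1 hcon.2
    rw [pvAInner_eq_any _ _ _ _ hne]
    have hany : ((PySem.List.pyRange 0 (↑nodes.length) 1).map
        (fun j' => (j', PySem.List.pyGetD nodes j' []))).any (fun p => decide (p.1 ≠ j ∧
          PySem.List.pyGetD (PySem.List.pyGetD p.2 0 []) 0 0 ≥
            PySem.List.pyGetD (PySem.List.pyGetD (PySem.List.pyGetD nodes j []) 0 []) 0 0 ∧
          PySem.List.pyGetD (PySem.List.pyGetD p.2 0 []) 1 0 ≤
            PySem.List.pyGetD (PySem.List.pyGetD (PySem.List.pyGetD nodes j []) 0 []) 1 0))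
        = pvRed (pvPairs nodes) j := by
      rw [Bool.eq_iff_iff]
      simp only [List.any_eq_true, List.mem_map, decide_eq_true_eq, pvRed]
      constructor
      · rintro ⟨p, ⟨j', hj', rfl⟩, hcond⟩
        refine ⟨j', by simpa [hlen] using hj', hcond.1, ?_, ?_⟩
        · rw [pvPairs_getD, pvPairs_getD]; exact hcond.2.1
        · rw [pvPairs_getD, pvPairs_getD]; exact hcond.2.2
      · rintro ⟨j', hj', hne', hc1, hc2⟩
        refine ⟨(j', PySem.List.pyGetD nodes j' []), ⟨j', by simpa [hlen] using hj', rfl⟩,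
          hne', ?_, ?_⟩
        · have := hc1; rw [pvPairs_getD, pvPairs_getD] at this; exact this
        · have := hc2; rw [pvPairs_getD, pvPairs_getD] at this; exact this
    rw [hany]
    cases hr : pvRed (pvPairs nodes) j <;> simp [hr]

-- ----- B-side proof machinery -----

def pvCond : Option Int → Int → Bool
  | some m, b => decide (m ≤ b)
  | none, _ => false

def pvMinAcc (ps : List (Int × Int)) : Option Int → List Int → Option Int
  | me, [] => me
  | me, i :: L => pvMinAcc ps (match me with
      | some m => if (PySem.List.pyGetD ps i (0, 0)).2 < m
                  then some ((PySem.List.pyGetD ps i (0, 0)).2) else some m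
      | none => some ((PySem.List.pyGetD ps i (0, 0)).2)) L

lemma pvBSweep_cons (ps : List (Int × Int)) (i : Int) (rest : List Int)
    (flags : List Bool) (me : Option Int) :
    pvBSweep ps (i :: rest) flags me =
    pvBSweep ps rest
      (match me with
       | some m => if m ≤ (PySem.List.pyGetD ps i (0, 0)).2
                   then PySem.List.pySetD flags i true else flags
       | none => flags)
      (match me with
       | some m => if (PySem.List.pyGetD ps i (0, 0)).2 < m
                   then some ((PySem.List.pyGetD ps i (0, 0)).2) else some m
       | none => some ((PySem.List.pyGetD ps i (0, 0)).2)) := rfl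

lemma pv_getD_set_ne (flags : List Bool) (i k : Int) (hi : 0 ≤ i) (hk : 0 ≤ k) (hne : i ≠ k) :
    PySem.List.pyGetD (PySem.List.pySetD flags i true) k false =
    PySem.List.pyGetD flags k false := by
  rw [PySem.List.pySetD_of_nonneg _ _ hi, PySem.List.pyGetD_of_nonneg _ _ hk,
    PySem.List.pyGetD_of_nonneg _ _ hk]
  have : i.toNat ≠ k.toNat := by omega
  simp [List.getD, List.getElem?_set_ne this]

lemma pvBSweep_not_mem (ps : List (Int × Int)) (L : List Int) :
    ∀ (flags : List Bool) (me : Option Int) (k : Int), 0 ≤ k → (∀ i ∈ L, 0 ≤ i) → k ∉ L →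
    PySem.List.pyGetD (pvBSweep ps L flags me) k false = PySem.List.pyGetD flags k false := by
  induction L with
  | nil => intro flags me k _ _ _; rfl
  | cons i rest ih =>
    intro flags me k hk0 hpos hk
    have hki : k ≠ i := fun h => hk (h ▸ List.mem_cons_self)
    have hi0 : 0 ≤ i := hpos i List.mem_cons_self
    rw [pvBSweep_cons, ih _ _ k hk0 (fun j hj => hpos j (List.mem_cons_of_mem _ hj))
      (fun h => hk (List.mem_cons_of_mem _ h))]
    cases me with
    | none => rfl
    | some m =>
      by_cases hle : m ≤ (PySem.List.pyGetD ps i (0, 0)).2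
      · simp only [if_pos hle]; exact pv_getD_set_ne flags i k hi0 hk0 (Ne.symm hki)
      · simp only [if_neg hle]

lemma pvBSweep_getD_mem (ps : List (Int × Int)) (L1 : List Int) :
    ∀ (k : Int) (L2 : List Int) (flags : List Bool) (me : Option Int),
    (L1 ++ k :: L2).Nodup → (∀ i ∈ L1 ++ k :: L2, 0 ≤ i) → k.toNat < flags.length →
    PySem.List.pyGetD flags k false = false →
    PySem.List.pyGetD (pvBSweep ps (L1 ++ k :: L2) flags me) k false =
      pvCond (pvMinAcc ps me L1) ((PySem.List.pyGetD ps k (0, 0)).2) := by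
  induction L1 with
  | nil =>
    intro k L2 flags me hnd hpos hlen hfl
    have hk0 : 0 ≤ k := hpos k (by simp)
    have hkL2 : k ∉ L2 := (List.nodup_cons.mp (by simpa using hnd)).1
    rw [List.nil_append] at *
    rw [pvBSweep_cons, pvBSweep_not_mem ps L2 _ _ k hk0
      (fun j hj => hpos j (List.mem_cons_of_mem _ hj)) hkL2]
    cases me with
    | none => exact hfl
    | some m =>
      by_cases hle : m ≤ (PySem.List.pyGetD ps k (0, 0)).2
      · simp only [if_pos hle, pvMinAcc, pvCond]
        rw [PySem.List.pySetD_of_nonneg _ _ hk0, PySem.List.pyGetD_of_nonneg _ _ hk0]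
        simp [List.getD, List.getElem?_set_self hlen, hle]
      · simp only [if_neg hle, pvMinAcc, pvCond, hfl]
        simp [hle]
  | cons i L1' ih =>
    intro k L2 flags me hnd hpos hlen hfl
    have hik : i ≠ k := by
      have : i ∉ L1' ++ k :: L2 := (List.nodup_cons.mp (by simpa using hnd)).1
      intro h; exact this (h ▸ (by simp))
    have hi0 : 0 ≤ i := hpos i (by simp)
    have hk0 : 0 ≤ k := hpos k (by simp)
    rw [List.cons_append, pvBSweep_cons]
    have hstep : pvMinAcc ps me (i :: L1') = pvMinAcc ps (match me with
        | some m => if (PySem.List.pyGetD ps i (0, 0)).2 < m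
                    then some ((PySem.List.pyGetD ps i (0, 0)).2) else some m
        | none => some ((PySem.List.pyGetD ps i (0, 0)).2)) L1' := rfl
    rw [hstep]
    apply ih
    · exact (List.nodup_cons.mp (by simpa using hnd)).2
    · exact fun j hj => hpos j (List.mem_cons_of_mem _ hj)
    · cases me with
      | none => exact hlen
      | some m =>
        by_cases hle : m ≤ (PySem.List.pyGetD ps i (0, 0)).2
        · simp only [if_pos hle, PySem.List.length_pySetD]; exact hlen
        · simp only [if_neg hle]; exact hlen
    · cases me with
      | none => exact hfl
      | some m =>
        by_cases hle : m ≤ (PySem.List.pyGetD ps i (0, 0)).2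
        · simp only [if_pos hle]; rw [pv_getD_set_ne flags i k hi0 hk0 hik]; exact hfl
        · simp only [if_neg hle]; exact hfl

lemma pvCond_minAcc (ps : List (Int × Int)) (L : List Int) :
    ∀ (me : Option Int) (b : Int),
    pvCond (pvMinAcc ps me L) b =
      (pvCond me b || L.any (fun j => decide ((PySem.List.pyGetD ps j (0, 0)).2 ≤ b))) := by
  induction L with
  | nil => intro me b; simp [pvMinAcc]
  | cons i rest ih =>
    intro me b
    cases me with
    | none =>
      rw [show pvMinAcc ps none (i :: rest) =
        pvMinAcc ps (some ((PySem.List.pyGetD ps i (0, 0)).2)) rest from rfl, ih]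
      simp [pvCond, List.any_cons]
    | some m =>
      by_cases hlt : (PySem.List.pyGetD ps i (0, 0)).2 < m
      · rw [show pvMinAcc ps (some m) (i :: rest) =
          pvMinAcc ps (if (PySem.List.pyGetD ps i (0, 0)).2 < m
            then some ((PySem.List.pyGetD ps i (0, 0)).2) else some m) rest from rfl,
          if_pos hlt, ih]
        rw [Bool.eq_iff_iff]
        simp only [pvCond, List.any_cons, Bool.or_eq_true, decide_eq_true_eq]
        constructor
        · rintro (h1 | h2)
          · exact Or.inr (Or.inl h1)
          · exact Or.inr (Or.inr h2)
        · rintro (h1 | h2 | h3)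
          · exact Or.inl (by omega)
          · exact Or.inl h2
          · exact Or.inr h3
      · rw [show pvMinAcc ps (some m) (i :: rest) =
          pvMinAcc ps (if (PySem.List.pyGetD ps i (0, 0)).2 < m
            then some ((PySem.List.pyGetD ps i (0, 0)).2) else some m) rest from rfl,
          if_neg hlt, ih]
        rw [Bool.eq_iff_iff]
        simp only [pvCond, List.any_cons, Bool.or_eq_true, decide_eq_true_eq]
        constructor
        · rintro (h1 | h2)
          · exact Or.inl h1
          · exact Or.inr (Or.inr h2)
        · rintro (h1 | h2 | h3)
          · exact Or.inl h1
          · exact Or.inl (by omega)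
          · exact Or.inr h3

lemma pvSorted2_eq_sorted (xs : List Int) (k1 k2 : Int → Int) :
    PySem.List.sorted2 xs k1 k2 false =
      PySem.List.sorted xs (fun x => toLex (k1 x, k2 x)) false := by
  rw [PySem.List.sorted_eq_foldl_insertBy]
  show List.foldl (fun acc x => PySem.List.insertBy
    (fun a b => decide (k1 a < k1 b) || (!decide (k1 b < k1 a) && decide (k2 a < k2 b))) x acc)
    [] xs = _
  congr 1
  funext acc x
  congr 1
  funext a b
  rcases lt_trichotomy (k1 a) (k1 b) with h | h | h
  · simp [Prod.Lex.lt_iff, h]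
  · simp [Prod.Lex.lt_iff, h]
  · simp [Prod.Lex.lt_iff, lt_asymm h, h.ne']
    exact fun h' => absurd h (not_lt.mpr h')

lemma pvFlag_eq_red (nodes : List (List (List Int))) (hnodup : (pvPairs nodes).Nodup)
    (k : Int) (hk0 : 0 ≤ k) (hk1 : k < ((pvPairs nodes).length : Int)) :
    PySem.List.pyGetD (pvBSweep (pvPairs nodes)
      (PySem.List.sorted (PySem.List.pyRange 0 ((pvPairs nodes).length : Int) 1)
        (fun i => toLex ((PySem.List.pyGetD (pvPairs nodes) i (0, 0)).1,
          -(PySem.List.pyGetD (pvPairs nodes) i (0, 0)).2)) false).reverse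
      (List.replicate (pvPairs nodes).length false) none) k false
    = pvRed (pvPairs nodes) k := by
  set ps := pvPairs nodes with hps
  set key := fun i : Int => toLex ((PySem.List.pyGetD ps i (0, 0)).1,
    -(PySem.List.pyGetD ps i (0, 0)).2) with hkey
  set ord := PySem.List.sorted (PySem.List.pyRange 0 ((ps.length : Int)) 1) key false with hord
  have hperm : ord.Perm (PySem.List.pyRange 0 ((ps.length : Int)) 1) :=
    PySem.List.sorted_perm _ _ _
  have hpair : ord.Pairwise (fun a b => key a ≤ key b) := PySem.List.sorted_pairwise _ _
  have hmem : k ∈ ord := hperm.mem_iff.mpr (PySem.List.mem_pyRange_one.mpr ⟨hk0, hk1⟩)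
  obtain ⟨pre, suf, hsplit⟩ := List.append_of_mem hmem
  have hordnodup : ord.Nodup := hperm.nodup_iff.mpr (PySem.List.nodup_pyRange_one 0 _)
  have hbounds : ∀ i ∈ ord, 0 ≤ i ∧ i < ((ps.length : Int)) := by
    intro i hi; exact PySem.List.mem_pyRange_one.mp (hperm.mem_iff.mp hi)
  have hrev : ord.reverse = suf.reverse ++ k :: pre.reverse := by
    rw [hsplit]; simp
  rw [hrev, pvBSweep_getD_mem]
  · rw [pvCond_minAcc]
    have h1 : pvCond (none : Option Int) ((PySem.List.pyGetD ps k (0, 0)).2) = false := rfl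
    rw [h1, Bool.false_or, List.any_reverse, Bool.eq_iff_iff]
    simp only [List.any_eq_true, decide_eq_true_eq, pvRed]
    have hnodup' : (pre ++ k :: suf).Nodup := by rw [← hsplit]; exact hordnodup
    have hpair' : (pre ++ k :: suf).Pairwise (fun a b => key a ≤ key b) := by
      rw [← hsplit]; exact hpair
    have hknotsuf : k ∉ suf := (List.nodup_cons.mp (List.nodup_append.mp hnodup').2.1).1
    constructor
    · rintro ⟨j, hj, hle⟩
      have hjord : j ∈ ord := by rw [hsplit]; exact List.mem_append_right _ (List.mem_cons_of_mem _ hj)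
      have hjb := hbounds j hjord
      have hjk : j ≠ k := fun h => hknotsuf (h ▸ hj)
      have hkeyle : key k ≤ key j :=
        (List.pairwise_cons.mp (List.pairwise_append.mp hpair').2.1).1 j hj
      have hage : (PySem.List.pyGetD ps j (0, 0)).1 ≥ (PySem.List.pyGetD ps k (0, 0)).1 := by
        rw [hkey] at hkeyle
        rcases Prod.Lex.le_iff.mp hkeyle with h | h
        · simpa using le_of_lt (by simpa using h)
        · simpa using le_of_eq (by simpa using h.1)
      exact ⟨j, PySem.List.mem_pyRange_one.mpr ⟨hjb.1, hjb.2⟩, hjk, hage, hle⟩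
    · rintro ⟨j, hjr, hjk, hage, hble⟩
      have hjb := PySem.List.mem_pyRange_one.mp hjr
      have hjord : j ∈ ord := hperm.mem_iff.mpr hjr
      rw [hsplit] at hjord
      rcases List.mem_append.mp hjord with hjpre | hjtail
      · exfalso
        have hkeyle : key j ≤ key k :=
          (List.pairwise_append.mp hpair').2.2 j hjpre k List.mem_cons_self
        rw [hkey] at hkeyle
        rcases Prod.Lex.le_iff.mp hkeyle with h | h
        · have : (PySem.List.pyGetD ps j (0, 0)).1 < (PySem.List.pyGetD ps k (0, 0)).1 := by
            simpa using h
          omega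
        · have ha : (PySem.List.pyGetD ps j (0, 0)).1 = (PySem.List.pyGetD ps k (0, 0)).1 := by
            simpa using h.1
          have hb : (PySem.List.pyGetD ps k (0, 0)).2 ≤ (PySem.List.pyGetD ps j (0, 0)).2 := by
            have := h.2; simp at this; omega
          have hpe : PySem.List.pyGetD ps j (0, 0) = PySem.List.pyGetD ps k (0, 0) :=
            Prod.ext ha (by omega)
          exact pvPairs_getD_ne nodes hnodup j k hjb.1 (by exact_mod_cast hjb.2) hk0
            (by exact_mod_cast hk1) hjk hpe
      · rcases List.mem_cons.mp hjtail with h | h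
        · exact absurd h hjk
        · exact ⟨j, h, hble⟩
  · rw [← hrev, List.nodup_reverse]; exact hordnodup
  · intro i hi
    rw [← hrev, List.mem_reverse] at hi
    exact (hbounds i hi).1
  · simp; omega
  · rw [PySem.List.pyGetD_of_nonneg _ _ hk0]
    simp [List.getD]

lemma pvB_eq_canon (nodes : List (List (List Int))) (h : Pre_remove_redundant nodes) :
    remove_redundant_alt nodes = pvCanon nodes := by
  have hnodup : (pvPairs nodes).Nodup := by rw [pvPairs_eq_headI]; exact h.2
  show (((PySem.List.pyRange 0 (PySem.List.len (pvPairs nodes)) 1).filter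
          (fun i => !(PySem.List.pyGetD (pvBSweep (pvPairs nodes)
            (PySem.List.sorted2 (PySem.List.pyRange 0 (PySem.List.len (pvPairs nodes)) 1)
              (fun i => (PySem.List.pyGetD (pvPairs nodes) i (0, 0)).1)
              (fun i => -(PySem.List.pyGetD (pvPairs nodes) i (0, 0)).2) false).reverse
            (List.replicate (pvPairs nodes).length false) none) i false))).map
        (fun i => PySem.List.pyGetD (PySem.List.pyGetD nodes i []) 0 []),
       ((PySem.List.pyRange 0 (PySem.List.len (pvPairs nodes)) 1).filter
          (fun i => PySem.List.pyGetD (pvBSweep (pvPairs nodes)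
            (PySem.List.sorted2 (PySem.List.pyRange 0 (PySem.List.len (pvPairs nodes)) 1)
              (fun i => (PySem.List.pyGetD (pvPairs nodes) i (0, 0)).1)
              (fun i => -(PySem.List.pyGetD (pvPairs nodes) i (0, 0)).2) false).reverse
            (List.replicate (pvPairs nodes).length false) none) i false)).map
        (fun i => PySem.List.pyGetD (PySem.List.pyGetD nodes i []) 0 []))
    = pvCanon nodes
  rw [PySem.List.len_eq, pvSorted2_eq_sorted]
  unfold pvCanon
  have hflag : ∀ i ∈ PySem.List.pyRange 0 ((pvPairs nodes).length : Int) 1,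
      PySem.List.pyGetD (pvBSweep (pvPairs nodes)
        (PySem.List.sorted (PySem.List.pyRange 0 ((pvPairs nodes).length : Int) 1)
          (fun i => toLex ((PySem.List.pyGetD (pvPairs nodes) i (0, 0)).1,
            -(PySem.List.pyGetD (pvPairs nodes) i (0, 0)).2)) false).reverse
        (List.replicate (pvPairs nodes).length false) none) i false = pvRed (pvPairs nodes) i := by
    intro i hi
    have hb := PySem.List.mem_pyRange_one.mp hi
    exact pvFlag_eq_red nodes hnodup i hb.1 hb.2
  congr 1
  · exact congrArg _ (List.filter_congr (fun i hi => by rw [hflag i hi]))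
  · exact congrArg _ (List.filter_congr (fun i hi => by rw [hflag i hi]))

-- ===== VERDICT (by name: the statement is the Claim_ definition above) =====
theorem remove_redundant_spec : Claim_equal_remove_redundant := by
  intro nodes _ hpre
  unfold Spec_remove_redundant
  rw [pvA_eq_canon nodes hpre, pvB_eq_canon nodes hpre]
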